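-- pv_equiv track=rewrite | github.com/Karan9083/Prectice_Python | Day1 to 100/Ass43.py | check_array_type
-- ===== SOURCE A (Python) =====
-- def check_array_type(arr):
--     odd = 0
--     even = 0
--     for num in arr:
--         if num % 2 == 0:
--             even += 1
--         else:
--             odd += 1
--     if odd == len(arr):
--         return "Odd type array"
--     elif even == len(arr):
--         return "Even type array"
--     else:
--         return "Mixed type array"
-- ===== SOURCE B (Python) =====
-- def check_array_type(arr):
--     if all(num % 2 != 0 for num in arr):
--         return "Odd type array"
--     elif all(num % 2 == 0 for num in arr):
--         return "Even type array"
--     else: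
--         return "Mixed type array"
-- ===== Notes on version B (the rewrite author's own statement) =====
-- stated objective: simpler
-- what changed: Replaces the odd/even counters compared against len(arr) by two short-circuiting all() predicate scans; no counts are maintained.
import Mathlib
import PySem

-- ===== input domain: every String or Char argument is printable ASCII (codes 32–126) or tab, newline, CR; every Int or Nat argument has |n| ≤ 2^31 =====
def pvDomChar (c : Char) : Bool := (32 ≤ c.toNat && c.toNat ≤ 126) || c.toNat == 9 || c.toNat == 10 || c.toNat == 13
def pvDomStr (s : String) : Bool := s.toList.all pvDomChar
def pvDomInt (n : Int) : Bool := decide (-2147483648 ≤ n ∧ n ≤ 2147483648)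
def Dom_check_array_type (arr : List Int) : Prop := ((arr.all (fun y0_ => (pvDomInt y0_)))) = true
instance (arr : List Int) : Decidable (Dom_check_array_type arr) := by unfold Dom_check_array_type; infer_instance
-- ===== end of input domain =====

-- B replaces A's odd/even counters (compared against len) by two all() predicate scans: simpler.


-- ===== PORT A =====
def check_array_type (arr : List Int) : String :=
  let oe := arr.foldl
    (fun (s : Int × Int) num =>
      if PySem.Int.mod num 2 == 0 then (s.1, s.2 + 1) else (s.1 + 1, s.2))
    (0, 0)
  if oe.1 == (arr.length : Int) then "Odd type array"
  else if oe.2 == (arr.length : Int) then "Even type array"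
  else "Mixed type array"

-- ===== PORT B =====
def check_array_type_alt (arr : List Int) : String :=
  if arr.all (fun num => !(PySem.Int.mod num 2 == 0)) then "Odd type array"
  else if arr.all (fun num => PySem.Int.mod num 2 == 0) then "Even type array"
  else "Mixed type array"

-- ===== PRECONDITION & SPEC =====
def Spec_check_array_type (arr : List Int) (out : String) : Prop := out = check_array_type_alt arr
instance (arr : List Int) (out : String) : Decidable (Spec_check_array_type arr out) := by unfold Spec_check_array_type; infer_instance

-- ===== CLAIM (what is proved, stated in full; the proofs are below) =====
def Claim_equal_check_array_type : Prop := ∀ (arr : List Int), Dom_check_array_type arr → Spec_check_array_type arr (check_array_type arr)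

-- ===== LEMMAS AND PROOFS =====

-- A's fold counts the non-even and even elements, offset by the initial counters.
theorem check_array_type_foldl_count (arr : List Int) (odd even : Int) :
    arr.foldl
      (fun (s : Int × Int) num =>
        if PySem.Int.mod num 2 == 0 then (s.1, s.2 + 1) else (s.1 + 1, s.2))
      (odd, even)
    = (odd + (arr.countP (fun num => !(PySem.Int.mod num 2 == 0)) : Int),
       even + (arr.countP (fun num => PySem.Int.mod num 2 == 0) : Int)) := by
  induction arr generalizing odd even with
  | nil => simp
  | cons x xs ih =>
    simp only [List.foldl_cons, List.countP_cons]
    by_cases h : PySem.Int.mod x 2 == 0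
    · rw [if_pos h, ih]
      simp only [h, Bool.not_true, if_true, Prod.mk.injEq]
      constructor <;> push_cast <;> ring
    · rw [if_neg h, ih]
      rw [Bool.not_eq_true] at h
      simp only [h, Bool.not_false, if_true, Prod.mk.injEq]
      constructor <;> push_cast <;> ring

theorem countP_eq_len_iff_all (arr : List Int) (p : Int → Bool) :
    ((arr.countP p : Int) = (arr.length : Int)) ↔ arr.all p = true := by
  rw [Int.natCast_inj, List.all_eq_true]
  exact ⟨fun h a ha => (List.countP_eq_length).mp h a ha,
         fun h => (List.countP_eq_length).mpr h⟩

-- ===== VERDICT (by name: the statement is the Claim_ definition above) =====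
theorem check_array_type_spec : Claim_equal_check_array_type := by
  intro arr _
  unfold Spec_check_array_type check_array_type check_array_type_alt
  rw [check_array_type_foldl_count]
  simp only [beq_iff_eq, zero_add]
  have h1 := countP_eq_len_iff_all arr (fun num => !(PySem.Int.mod num 2 == 0))
  have h2 := countP_eq_len_iff_all arr (fun num => PySem.Int.mod num 2 == 0)
  split_ifs <;> first | rfl | (exfalso; tauto)
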